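-- pv_equiv track=rewrite | github.com/Boot-Camp-Coding-Test/second_day_practice | problem2/[김유민]기능개발.py | solution
-- ===== SOURCE A (Python) =====
-- import math
--
-- def solution(progresses, speeds):
--     result = []
--     num = 1
--     max_date = math.ceil((100-progresses[0])/speeds[0])
--
--
--     for i in range(len(progresses))[1:] :
--         date = math.ceil((100-progresses[i])/speeds[i])
--
--         if max_date < date :
--             max_date = date
--             result.append(num)
--             num = 1
--         else :
--             num += 1
--
--     result.append(num)
--
--     answer = result
--     return answer
-- ===== SOURCE B (Python) =====
-- import math
--
-- def solution(progresses, speeds):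
--     n = len(progresses)
--     days = [math.ceil((100 - progresses[i]) / speeds[i]) for i in range(n)]
--     bounds = [i for i in range(n) if all(d < days[i] for d in days[:i])]
--     edges = bounds + [n]
--     return [edges[k + 1] - edges[k] for k in range(len(edges) - 1)]
-- ===== Notes on version B (the rewrite author's own statement) =====
-- stated objective: alternative
-- what changed: A fuses day computation and grouping into one loop carrying a counter and a running max; B instead characterises group boundaries globally as prefix-record indices (days[i] greater than every earlier day, checked with a quadratic all() over days[:i]) and returns consecutive differences of the boundary-index list.
import Mathlib
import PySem

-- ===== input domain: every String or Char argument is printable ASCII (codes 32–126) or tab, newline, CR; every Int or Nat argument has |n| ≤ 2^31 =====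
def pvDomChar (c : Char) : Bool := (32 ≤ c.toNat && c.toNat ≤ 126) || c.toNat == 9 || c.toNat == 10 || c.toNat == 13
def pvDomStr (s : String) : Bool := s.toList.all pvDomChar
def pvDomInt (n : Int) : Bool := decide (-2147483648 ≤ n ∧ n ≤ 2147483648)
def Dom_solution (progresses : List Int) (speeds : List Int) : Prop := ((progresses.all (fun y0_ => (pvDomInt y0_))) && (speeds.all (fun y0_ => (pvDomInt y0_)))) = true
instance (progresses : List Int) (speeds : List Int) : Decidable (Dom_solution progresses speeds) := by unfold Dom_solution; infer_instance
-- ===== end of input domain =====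

-- B replaces A's fused counter loop by: precompute the days list, find group boundaries
-- as prefix-record indices (days[i] greater than every earlier day), return consecutive
-- differences of the boundary indices. Return-value equivalence on Pre_.

-- math.ceil((100-p)/s): exact ceiling division (exact on the stated |n| ≤ 2^31 domain,
-- where float division followed by ceil equals exact ceil)
def pyCeilDiv (a b : Int) : Int := -(PySem.Int.floordiv (-a) b)

-- ===== PORT A =====
def solution (progresses : List Int) (speeds : List Int) : List Int :=
  match progresses, speeds with
  | p0 :: _, s0 :: _ =>
    let st := (PySem.List.pyRange 1 progresses.length 1).foldl
      (fun (st : List Int × Int × Int) i =>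
        let date := pyCeilDiv (100 - PySem.List.pyGetD progresses i 0)
                              (PySem.List.pyGetD speeds i 0)
        if st.2.2 < date then (st.1 ++ [st.2.1], 1, date)
        else (st.1, st.2.1 + 1, st.2.2))
      (([] : List Int), (1 : Int), pyCeilDiv (100 - p0) s0)
    st.1 ++ [st.2.1]
  | _, _ => []   -- Python raises IndexError here (excluded by Pre_)

-- ===== PORT B =====
def solution_alt (progresses : List Int) (speeds : List Int) : List Int :=
  let n : Int := progresses.length
  let days := (PySem.List.pyRange 0 n 1).map (fun i =>
      pyCeilDiv (100 - PySem.List.pyGetD progresses i 0)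
                (PySem.List.pyGetD speeds i 0))
  let bounds := (PySem.List.pyRange 0 n 1).filter (fun i =>
      (PySem.List.slice days none (some i)).all (fun d => d < PySem.List.pyGetD days i 0))
  let edges := bounds ++ [n]
  (PySem.List.pyRange 0 (PySem.List.len edges - 1) 1).map (fun k =>
      PySem.List.pyGetD edges (k + 1) 0 - PySem.List.pyGetD edges k 0)

-- ===== PRECONDITION & SPEC =====
-- Exactly the inputs on which Python A returns: nonempty progresses, speeds at least as long
-- (both are indexed over range(len(progresses))), and no zero speed among the indexed ones.
def Pre_solution (progresses : List Int) (speeds : List Int) : Prop :=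
  progresses ≠ [] ∧ progresses.length ≤ speeds.length ∧
  ∀ s ∈ speeds.take progresses.length, s ≠ 0
instance (progresses : List Int) (speeds : List Int) : Decidable (Pre_solution progresses speeds) := by
  unfold Pre_solution; infer_instance

def pvWitness_solution : List Int × List Int := ([93, 30, 55], [1, 30, 5])

def Spec_solution (progresses : List Int) (speeds : List Int) (out : List Int) : Prop :=
  out = solution_alt progresses speeds
instance (progresses : List Int) (speeds : List Int) (out : List Int) : Decidable (Spec_solution progresses speeds out) := by
  unfold Spec_solution; infer_instance

-- ===== CLAIM (what is proved, stated in full; the proofs are below) =====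
def Claim_equal_solution : Prop := ∀ (progresses : List Int) (speeds : List Int), Dom_solution progresses speeds → Pre_solution progresses speeds → Spec_solution progresses speeds (solution progresses speeds)

-- ===== LEMMAS AND PROOFS =====

-- A's loop body over a precomputed days element
def stepA (st : List Int × Int × Int) (d : Int) : List Int × Int × Int :=
  if st.2.2 < d then (st.1 ++ [st.2.1], 1, d) else (st.1, st.2.1 + 1, st.2.2)

-- canonical grouping of a days list (proof-side reference both ports are reduced to)
def groupDays : List Int → List Int
  | [] => []
  | d :: rest =>
    (((rest.takeWhile (fun x => x ≤ d)).length : Int) + 1) ::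
      groupDays (rest.dropWhile (fun x => x ≤ d))
termination_by l => l.length
decreasing_by
  simpa using Nat.lt_succ_of_le (List.length_dropWhile_le _ _)

-- B-side reference pieces: record predicate, record indices, consecutive differences
def isRec (ds : List Int) (i : Nat) : Bool := (ds.take i).all (fun d => d < ds.getD i 0)
def recs (ds : List Int) : List Nat := (List.range ds.length).filter (isRec ds)
def diffs : List Int → List Int
  | a :: b :: t => (b - a) :: diffs (b :: t)
  | _ => []

theorem groupDays_nil : groupDays [] = [] := by rw [groupDays.eq_def]
theorem groupDays_cons (d : Int) (rest : List Int) :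
    groupDays (d :: rest) =
      (((rest.takeWhile (fun x => x ≤ d)).length : Int) + 1) ::
        groupDays (rest.dropWhile (fun x => x ≤ d)) := by
  rw [groupDays.eq_def]
theorem diffs_map_add (k : Int) (l : List Int) :
    diffs (l.map (fun x => x + k)) = diffs l := by
  match l with
  | [] => rfl
  | [a] => rfl
  | a :: b :: t =>
    have ih := diffs_map_add k (b :: t)
    simp only [List.map_cons, diffs] at *
    rw [ih]
    ring_nf

theorem foldA_eq_group (ds : List Int) : ∀ (acc : List Int) (num d0 : Int),
    (let st := ds.foldl stepA (acc, num, d0); st.1 ++ [st.2.1]) =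
      acc ++ (num + ((ds.takeWhile (fun x => x ≤ d0)).length : Int)) ::
        groupDays (ds.dropWhile (fun x => x ≤ d0)) := by
  induction ds with
  | nil => intro acc num d0; simp [groupDays_nil]
  | cons x xs ih =>
    intro acc num d0
    by_cases h : x ≤ d0
    · have hlt : ¬ d0 < x := not_lt.mpr h
      simp only [List.foldl_cons, stepA, hlt, if_false, List.takeWhile_cons, List.dropWhile_cons,
        h, decide_true]
      rw [ih]
      simp; ring_nf
    · have hlt : d0 < x := lt_of_not_ge h
      simp only [List.foldl_cons, stepA, if_pos hlt, List.takeWhile_cons, List.dropWhile_cons,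
        h, decide_false]
      rw [ih]
      simp only [Bool.false_eq_true, if_false, List.length_nil, Nat.cast_zero, add_zero]
      rw [groupDays_cons]
      simp [add_comm]


theorem diffs_via_natrange (es : List Int) :
    (List.range (es.length - 1)).map (fun k => es.getD (k + 1) 0 - es.getD k 0) = diffs es := by
  match es with
  | [] => rfl
  | [a] => rfl
  | a :: b :: t =>
    have ih := diffs_via_natrange (b :: t)
    show (List.range (t.length + 1)).map _ = _
    rw [List.range_succ_eq_map, List.map_cons, List.map_map]
    simp only [diffs]
    rw [← ih]
    simp only [List.getD_cons_succ, List.getD_cons_zero, List.length_cons, Nat.add_sub_cancel]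
    congr 1


-- positions 1..c of d::rest (inside the block of followers ≤ d) are not records
theorem isRec_mid (d : Int) (rest : List Int) (j : Nat)
    (hj : j < (rest.takeWhile (fun x => x ≤ d)).length) :
    isRec (d :: rest) (j + 1) = false := by
  set t := rest.takeWhile (fun x => x ≤ d) with ht
  have hx : (d :: rest).getD (j + 1) 0 = t.getD j 0 := by
    have : rest.getD j 0 = t.getD j 0 := by
      conv_lhs => rw [← List.takeWhile_append_dropWhile (p := fun x => decide (x ≤ d)) (l := rest)]
      exact List.getD_append _ _ _ _ (by simpa using hj)
    simpa using this
  have hmem : t.getD j 0 ∈ t := by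
    rw [List.getD_eq_getElem t 0 hj]; exact List.getElem_mem hj
  have hle : t.getD j 0 ≤ d := by simpa using List.mem_takeWhile_imp hmem
  unfold isRec
  rw [hx, List.take_succ_cons, List.all_cons, decide_eq_false (not_lt.mpr hle)]
  simp

-- records past the block correspond to records of the dropWhile remainder
theorem isRec_shift (d : Int) (rest : List Int) (j : Nat)
    (hj : j < (rest.dropWhile (fun x => x ≤ d)).length) :
    isRec (d :: rest) ((rest.takeWhile (fun x => x ≤ d)).length + 1 + j) = isRec (rest.dropWhile (fun x => x ≤ d)) j := by
  set t := rest.takeWhile (fun x => x ≤ d) with ht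
  set r := rest.dropWhile (fun x => x ≤ d) with hr
  have hsplit : rest = t ++ r := (List.takeWhile_append_dropWhile).symm
  have hrne : r ≠ [] := List.ne_nil_of_length_pos (by omega)
  have hd : d < r.getD 0 0 := by
    have := List.head_dropWhile_not (fun x => decide (x ≤ d)) hrne
    rw [List.getD_eq_getElem r 0 (by omega), ← List.head_eq_getElem hrne]
    simpa using this
  have hx : (d :: rest).getD (t.length + 1 + j) 0 = r.getD j 0 := by
    have h1 : (d :: rest).getD (t.length + 1 + j) 0 = rest.getD (t.length + j) 0 := by
      have : t.length + 1 + j = (t.length + j) + 1 := by omega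
      rw [this]; simp
    rw [h1]
    conv_lhs => rw [hsplit]
    rw [List.getD_append_right t r 0 (t.length + j) (by omega)]
    congr 1
    omega
  have htake : (d :: rest).take (t.length + 1 + j) = d :: (t ++ r.take j) := by
    have : (d :: rest).take (t.length + 1 + j) = d :: rest.take (t.length + j) := by
      have : t.length + 1 + j = (t.length + j) + 1 := by omega
      rw [this]; simp
    rw [this]
    congr 1
    rw [hsplit, List.take_append]
    congr 1
    · exact List.take_of_length_le (by omega)
    · congr 1; omega
  unfold isRec
  rw [hx, htake]
  set x := r.getD j 0 with hxdef
  by_cases hb : (r.take j).all (fun y => y < x)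
  · have hdx : d < x := by
      rcases Nat.eq_zero_or_pos j with h0 | hpos
      · subst h0; simpa [hxdef] using hd
      · have hmem : r.getD 0 0 ∈ r.take j := by
          rw [List.getD_eq_getElem r 0 (show (0:Nat) < r.length by omega)]
          have hh : (0:Nat) < (r.take j).length := by rw [List.length_take]; omega
          have := List.getElem_mem hh
          rwa [List.getElem_take] at this
        exact lt_trans hd (by simpa using List.all_eq_true.mp hb _ hmem)
    have ht' : t.all (fun y => y < x) := by
      refine List.all_eq_true.mpr ?_
      intro y hy
      have : y ≤ d := by simpa using List.mem_takeWhile_imp hy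
      simp; omega
    simp [List.all_cons, List.all_append, ht', hb, hdx]
  · have hb' : (r.take j).all (fun y => y < x) = false := Bool.eq_false_iff.mpr hb
    simp [List.all_cons, List.all_append, hb']

theorem isRec_zero (ds : List Int) : isRec ds 0 = true := rfl

theorem recs_nil : recs [] = [] := rfl

theorem recs_head (r : List Int) (h : r ≠ []) : ∃ tl, recs r = 0 :: tl := by
  match r, h with
  | y :: r', _ =>
    refine ⟨((List.range r'.length).map Nat.succ).filter (isRec (y :: r')), ?_⟩
    unfold recs
    rw [List.length_cons, List.range_succ_eq_map, List.filter_cons]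
    simp [isRec_zero]

theorem recs_cons (d : Int) (rest : List Int) :
    recs (d :: rest) = 0 ::
      (recs (rest.dropWhile (fun x => x ≤ d))).map
        (fun j => (rest.takeWhile (fun x => x ≤ d)).length + 1 + j) := by
  set t := rest.takeWhile (fun x => x ≤ d) with ht
  set r := rest.dropWhile (fun x => x ≤ d) with hr
  have hlen : (d :: rest).length = (t.length + 1) + r.length := by
    have : t.length + r.length = rest.length := by
      rw [ht, hr, ← List.length_append, List.takeWhile_append_dropWhile]
    simp; omega
  unfold recs
  rw [hlen, List.range_add, List.filter_append]
  have h1 : (List.range (t.length + 1)).filter (isRec (d :: rest)) = [0] := by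
    rw [List.range_succ_eq_map, List.filter_cons]
    simp only [isRec_zero]
    rw [List.filter_map]
    have : (List.range t.length).filter ((isRec (d :: rest)) ∘ Nat.succ) = [] := by
      rw [List.filter_eq_nil_iff.mpr]
      intro j hj
      have := isRec_mid d rest j (List.mem_range.mp hj)
      simp [Function.comp, this]
    rw [this]
    rfl
  have h2 : ((List.range r.length).map (fun x => t.length + 1 + x)).filter (isRec (d :: rest)) =
      (recs r).map (fun j => t.length + 1 + j) := by
    rw [List.filter_map]
    unfold recs
    congr 1
    apply List.filter_congr
    intro j hj
    have := isRec_shift d rest j (List.mem_range.mp hj)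
    simpa [Function.comp] using this
  rw [h1, h2]
  rfl

theorem recs_eq : ∀ (n : Nat) (ds : List Int), ds.length ≤ n → ds ≠ [] →
    diffs ((recs ds).map (fun j => Int.ofNat j) ++ [(ds.length : Int)]) = groupDays ds := by
  intro n
  induction n with
  | zero =>
    intro ds h h'
    exact absurd (List.eq_nil_of_length_eq_zero (by omega)) h'
  | succ n ihn =>
    intro ds hlen hne
    match ds, hne with
    | d :: rest, _ =>
      rw [recs_cons, groupDays_cons]
      set t := rest.takeWhile (fun x => x ≤ d) with ht
      set r := rest.dropWhile (fun x => x ≤ d) with hr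
      have hsum : t.length + r.length = rest.length := by
        rw [ht, hr, ← List.length_append, List.takeWhile_append_dropWhile]
      by_cases hrnil : r = []
      · rw [hrnil, recs_nil]
        have h0 : r.length = 0 := by rw [hrnil]; rfl
        have hL : ((d :: rest).length : Int) = (t.length : Int) + 1 := by
          simp only [List.length_cons]; push_cast; omega
        rw [hL, groupDays_nil]
        simp [diffs]
      · obtain ⟨tl, htl⟩ := recs_head r hrnil
        have hIH : diffs ((recs r).map (fun j => Int.ofNat j) ++ [(r.length : Int)]) = groupDays r :=
          ihn r (by simp at hlen; omega) hrnil
        have hshape : ((0 :: (recs r).map (fun j => t.length + 1 + j)).map (fun j => Int.ofNat j)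
              ++ [((d :: rest).length : Int)]) =
            0 :: ((recs r).map (fun j => Int.ofNat j) ++ [(r.length : Int)]).map
              (fun x => x + ((t.length : Int) + 1)) := by
          simp only [List.map_cons, List.map_append, List.map_map, List.cons_append,
            Int.ofNat_eq_natCast, Nat.cast_zero]
          congr 1
          congr 1
          · apply List.map_congr_left
            intro j hj
            simp only [Function.comp]
            push_cast
            ring
          · simp only [List.map_nil]
            congr 1
            simp only [List.length_cons]
            push_cast
            omega
        rw [hshape, htl]
        have hmap0 : ((recs r).map (fun j => Int.ofNat j) ++ [(r.length : Int)]).map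
              (fun x => x + ((t.length : Int) + 1)) =
            ((t.length : Int) + 1) ::
              (((tl.map (fun j => Int.ofNat j)) ++ [(r.length : Int)]).map
                (fun x => x + ((t.length : Int) + 1))) := by
          rw [htl]
          simp only [List.map_cons, List.cons_append, List.map_cons, Int.ofNat_eq_natCast, Nat.cast_zero, zero_add]
        rw [← htl, hmap0, diffs]
        have h2 : ((t.length : Int) + 1) - 0 = (t.length : Int) + 1 := by ring
        rw [h2]
        congr 1
        have h3 : ((t.length : Int) + 1) ::
              ((tl.map (fun j => Int.ofNat j) ++ [(r.length : Int)]).map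
                (fun x => x + ((t.length : Int) + 1))) =
            ((recs r).map (fun j => Int.ofNat j) ++ [(r.length : Int)]).map
              (fun x => x + ((t.length : Int) + 1)) := by
          rw [htl]
          simp [Int.ofNat_eq_natCast]
        rw [h3, diffs_map_add, hIH]


-- bridge: B's pipeline equals diffs of the record-index edges of its days list
theorem alt_eq_diffs (progresses speeds : List Int) :
    solution_alt progresses speeds =
      diffs ((recs ((List.range progresses.length).map
          (fun k => pyCeilDiv (100 - PySem.List.pyGetD progresses (Int.ofNat k) 0)
                              (PySem.List.pyGetD speeds (Int.ofNat k) 0)))).map (fun j => Int.ofNat j)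
        ++ [(progresses.length : Int)]) := by
  simp only [solution_alt]
  set f : Int → Int := fun i =>
    pyCeilDiv (100 - PySem.List.pyGetD progresses i 0) (PySem.List.pyGetD speeds i 0) with hf
  have h1 : (PySem.List.pyRange 0 ((progresses.length : Int)) 1).map f =
      (List.range progresses.length).map (fun k => f (Int.ofNat k)) := by
    rw [PySem.List.pyRange_zero_nat, List.map_map]; rfl
  rw [h1]
  set ds := (List.range progresses.length).map (fun k => f (Int.ofNat k)) with hds
  have hdslen : ds.length = progresses.length := by simp [hds]
  have h2 : (PySem.List.pyRange 0 (progresses.length : Int)).filter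
      (fun i => (PySem.List.slice ds none (some i)).all
        (fun d => decide (d < PySem.List.pyGetD ds i 0))) =
      (recs ds).map (fun j => Int.ofNat j) := by
    rw [PySem.List.pyRange_zero_nat, List.filter_map]
    unfold recs
    rw [hdslen]
    rw [List.filter_congr (q := isRec ds) ?_]
    · rfl
    · intro k _
      simp only [Function.comp_def, PySem.List.slice_to_natCast, PySem.List.pyGetD_natCast]
      rfl
  rw [h2]
  set edges := (recs ds).map (fun j => Int.ofNat j) ++ [(progresses.length : Int)] with hedges
  have hel : edges.length = (recs ds).length + 1 := by simp [hedges]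
  have h3 : PySem.List.len edges - 1 = ((edges.length - 1 : Nat) : Int) := by
    rw [PySem.List.len_eq, hel]
    push_cast
    omega
  rw [h3, PySem.List.pyRange_zero_nat, List.map_map]
  rw [← diffs_via_natrange edges]
  apply List.map_congr_left
  intro k _
  simp only [Function.comp_def]
  rw [show ((k : Int) + 1) = (((k + 1 : Nat)) : Int) by push_cast; ring]
  rw [PySem.List.pyGetD_natCast, PySem.List.pyGetD_natCast]

theorem sol_eq_group (p0 s0 : Int) (pr sr : List Int) :
    solution (p0 :: pr) (s0 :: sr) =
      groupDays (((List.range (p0 :: pr).length).map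
        (fun k => pyCeilDiv (100 - PySem.List.pyGetD (p0 :: pr) (Int.ofNat k) 0)
                            (PySem.List.pyGetD (s0 :: sr) (Int.ofNat k) 0)))) := by
  set f : Int → Int := fun i =>
    pyCeilDiv (100 - PySem.List.pyGetD (p0 :: pr) i 0) (PySem.List.pyGetD (s0 :: sr) i 0) with hf
  have hdays : (List.range (p0 :: pr).length).map (fun k => f (Int.ofNat k)) =
      f 0 :: (PySem.List.pyRange 1 ((p0 :: pr).length : Int) 1).map f := by
    have h0 : PySem.List.pyRange 0 ((p0 :: pr).length : Int) 1 =
        0 :: PySem.List.pyRange 1 ((p0 :: pr).length : Int) 1 :=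
      PySem.List.pyRange_one_cons (by exact_mod_cast Nat.succ_pos pr.length)
    have h1 : (PySem.List.pyRange 0 (((p0 :: pr).length : Int)) 1).map f =
        (List.range (p0 :: pr).length).map (fun k => f (Int.ofNat k)) := by
      rw [PySem.List.pyRange_zero_nat, List.map_map]; rfl
    rw [← h1, h0, List.map_cons]
  have hf0 : f 0 = pyCeilDiv (100 - p0) s0 := by
    simp [hf]
  show (let st := (PySem.List.pyRange 1 (((p0 :: pr).length : Int)) 1).foldl (fun st i => stepA st (f i)) (([] : List Int), (1 : Int), pyCeilDiv (100 - p0) s0); st.1 ++ [st.2.1]) = _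
  rw [← List.foldl_map]
  rw [foldA_eq_group]
  rw [hdays, hf0, groupDays_cons]
  simp [add_comm]

-- ===== VERDICT (by name: the statement is the Claim_ definition above) =====
theorem solution_spec : Claim_equal_solution := by
  intro progresses speeds _ hpre
  unfold Spec_solution
  match progresses, speeds, hpre with
  | p0 :: pr, s0 :: sr, _ =>
    rw [alt_eq_diffs, sol_eq_group]
    have hlen : ((List.range (p0 :: pr).length).map
        (fun k => pyCeilDiv (100 - PySem.List.pyGetD (p0 :: pr) (Int.ofNat k) 0)
                            (PySem.List.pyGetD (s0 :: sr) (Int.ofNat k) 0))).length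
        = (p0 :: pr).length := by simp
    have hne : ((List.range (p0 :: pr).length).map
        (fun k => pyCeilDiv (100 - PySem.List.pyGetD (p0 :: pr) (Int.ofNat k) 0)
                            (PySem.List.pyGetD (s0 :: sr) (Int.ofNat k) 0))) ≠ [] := by
      intro h
      rw [h] at hlen
      simp at hlen
    rw [show (((p0 :: pr).length : Nat) : Int) = ((((List.range (p0 :: pr).length).map
        (fun k => pyCeilDiv (100 - PySem.List.pyGetD (p0 :: pr) (Int.ofNat k) 0)
                            (PySem.List.pyGetD (s0 :: sr) (Int.ofNat k) 0))).length : Nat) : Int)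
      from by rw [hlen]]
    exact (recs_eq _ _ le_rfl hne).symm
  | p0 :: pr, [], h => exact absurd h.2.1 (by simp)
  | [], _, h => exact absurd rfl h.1
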